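-- pv_equiv track=rewrite | github.com/MaterialsRealm/materials-project-helper | src/mp_helper/materials.py | iter_request_chunk_sizes
-- ===== SOURCE A (Python) =====
-- from collections.abc import Iterable, Iterator
--
-- def iter_request_chunk_sizes(
--     chunk_size: int,
--     num_chunks: int | None,
--     limit: int | None,
-- ) -> Iterator[int]:
--     """Produce a series of per-request chunk sizes given constraints.
--
--     Rules:
--     - num_chunks and limit can both be None (unbounded mode): produce
--       chunk_size forever until upstream page is empty.
--     - limit=None, num_chunks set: produce `num_chunks` chunks of `chunk_size`.
--     - num_chunks=None, limit set: produce chunks sized at most `chunk_size`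
--       until total hits `limit`.
--     - both set: produce chunks exactly as above, and stop when either `requested >= num_chunks`
--       or `remaining <= 0`. That is, when both limits are present, the effective total
--       retrieved is limited by the first of `num_chunks * chunk_size` or `limit`.
--
--     Returns:
--         Iterator over each request's chunk_size.
--     """
--     if chunk_size <= 0:
--         raise ValueError("`chunk_size` must be a positive integer")
--     if num_chunks is not None and num_chunks <= 0:
--         raise ValueError("`num_chunks` must be positive or None")
--     if limit is not None and limit <= 0:
--         raise ValueError("`limit` must be positive or None")
--
--     remaining = limit
--     requested = 0
--     while True:
--         if num_chunks is not None and requested >= num_chunks: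
--             break
--         if remaining is not None and remaining <= 0:
--             break
--
--         next_chunk = chunk_size if remaining is None else min(chunk_size, remaining)
--         yield next_chunk
--
--         requested += 1
--         if remaining is not None:
--             remaining -= next_chunk
--
--         if remaining is not None and remaining <= 0:
--             break
-- ===== SOURCE B (Python) =====
-- def iter_request_chunk_sizes(chunk_size, num_chunks, limit):
--     if chunk_size <= 0:
--         raise ValueError("`chunk_size` must be a positive integer")
--     if num_chunks is not None and num_chunks <= 0:
--         raise ValueError("`num_chunks` must be positive or None")
--     if limit is not None and limit <= 0:
--         raise ValueError("`limit` must be positive or None")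
--
--     if num_chunks is None and limit is None:
--         while True:
--             yield chunk_size
--     elif limit is None:
--         for _ in range(num_chunks):
--             yield chunk_size
--     else:
--         total = limit if num_chunks is None else min(limit, num_chunks * chunk_size)
--         full, rem = divmod(total, chunk_size)
--         for _ in range(full):
--             yield chunk_size
--         if rem:
--             yield rem
-- ===== Notes on version B (the rewrite author's own statement) =====
-- stated objective: alternative
-- what changed: B replaces A's while-loop that tracks a running `remaining` and `requested` with a closed-form computation: the bounded total is min(limit, num_chunks*chunk_size), and divmod gives the number of full chunks plus the trailing remainder chunk.
-- outside the precondition, e.g. on iter_request_chunk_sizes(0, 1, 1): A raises ValueError, B raises ValueError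
import Mathlib
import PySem

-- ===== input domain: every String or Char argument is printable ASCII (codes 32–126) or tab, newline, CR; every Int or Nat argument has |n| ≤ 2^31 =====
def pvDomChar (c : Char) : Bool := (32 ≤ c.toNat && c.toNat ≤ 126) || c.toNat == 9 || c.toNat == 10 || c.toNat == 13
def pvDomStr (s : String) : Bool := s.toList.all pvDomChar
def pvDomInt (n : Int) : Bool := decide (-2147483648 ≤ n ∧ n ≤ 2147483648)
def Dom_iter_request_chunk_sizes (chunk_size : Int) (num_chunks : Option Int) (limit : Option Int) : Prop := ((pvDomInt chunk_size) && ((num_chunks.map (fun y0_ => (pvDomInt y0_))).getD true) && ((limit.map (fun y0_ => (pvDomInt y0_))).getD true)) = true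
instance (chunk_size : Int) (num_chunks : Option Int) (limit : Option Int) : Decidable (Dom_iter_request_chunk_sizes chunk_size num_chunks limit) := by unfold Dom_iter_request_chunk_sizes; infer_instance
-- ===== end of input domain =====

-- B computes the chunk count and trailing remainder in closed form with divmod instead of A's running-remaining loop.
-- ===== PORT A =====
-- the while-True loop of A, with fuel (enough fuel is supplied by the caller for every input Pre_ admits)
def iterLoopA (cs : Int) (nc : Option Int) : Nat → Option Int → Int → List Int
  | 0, _, _ => []
  | f+1, remaining, requested =>
    if (match nc with | some n => decide (requested ≥ n) | none => false) then []
    else if (match remaining with | some r => decide (r ≤ 0) | none => false) then []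
    else
      let next := match remaining with | none => cs | some r => min cs r
      let remaining' := match remaining with | none => none | some r => some (r - next)
      next :: (if (match remaining' with | some r => decide (r ≤ 0) | none => false) then []
               else iterLoopA cs nc f remaining' (requested + 1))

def iter_request_chunk_sizes (chunk_size : Int) (num_chunks : Option Int) (limit : Option Int) : List Int :=
  if chunk_size ≤ 0 then []      -- A raises ValueError here (excluded by Pre_)
  else if (match num_chunks with | some n => decide (n ≤ 0) | none => false) then []  -- ValueError
  else if (match limit with | some l => decide (l ≤ 0) | none => false) then []       -- ValueError
  else
    iterLoopA chunk_size num_chunks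
      ((match num_chunks with | some n => n.toNat | none => 0) +
       (match limit with | some l => l.toNat | none => 0) + 1)
      limit 0

-- ===== PORT B =====
def iter_request_chunk_sizes_alt (chunk_size : Int) (num_chunks : Option Int) (limit : Option Int) : List Int :=
  if chunk_size ≤ 0 then []      -- B raises ValueError here (excluded by Pre_)
  else if (match num_chunks with | some n => decide (n ≤ 0) | none => false) then []  -- ValueError
  else if (match limit with | some l => decide (l ≤ 0) | none => false) then []       -- ValueError
  else
    match num_chunks, limit with
    | none, none => []           -- B's generator yields chunk_size forever here (excluded by Pre_)
    | some n, none => List.replicate n.toNat chunk_size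
    | nc, some l =>
      let total := match nc with | none => l | some n => min l (n * chunk_size)
      let full := PySem.Int.floordiv total chunk_size
      let rem := PySem.Int.mod total chunk_size
      List.replicate full.toNat chunk_size ++ (if rem ≠ 0 then [rem] else [])

-- ===== PRECONDITION & SPEC =====
-- Pre_ excludes exactly the inputs where A raises ValueError (a non-positive chunk_size,
-- num_chunks or limit) and the both-None mode, where A's generator never terminates.
def Pre_iter_request_chunk_sizes (chunk_size : Int) (num_chunks : Option Int) (limit : Option Int) : Prop :=
  0 < chunk_size ∧ 0 < num_chunks.getD 1 ∧ 0 < limit.getD 1 ∧ (num_chunks.isSome ∨ limit.isSome)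
instance (chunk_size : Int) (num_chunks : Option Int) (limit : Option Int) : Decidable (Pre_iter_request_chunk_sizes chunk_size num_chunks limit) := by unfold Pre_iter_request_chunk_sizes; infer_instance

def pvWitness_iter_request_chunk_sizes : Int × Option Int × Option Int := (3, some 2, some 7)

def Spec_iter_request_chunk_sizes (chunk_size : Int) (num_chunks : Option Int) (limit : Option Int) (out : List Int) : Prop := out = iter_request_chunk_sizes_alt chunk_size num_chunks limit
instance (chunk_size : Int) (num_chunks : Option Int) (limit : Option Int) (out : List Int) : Decidable (Spec_iter_request_chunk_sizes chunk_size num_chunks limit out) := by unfold Spec_iter_request_chunk_sizes; infer_instance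

-- ===== CLAIM (what is proved, stated in full; the proofs are below) =====
def Claim_equal_iter_request_chunk_sizes : Prop := ∀ (chunk_size : Int) (num_chunks : Option Int) (limit : Option Int), Dom_iter_request_chunk_sizes chunk_size num_chunks limit → Pre_iter_request_chunk_sizes chunk_size num_chunks limit → Spec_iter_request_chunk_sizes chunk_size num_chunks limit (iter_request_chunk_sizes chunk_size num_chunks limit)

-- ===== LEMMAS AND PROOFS =====

-- the shape B computes for a bounded total t (with a guard for exhausted totals)
def cfShape (cs t : Int) : List Int :=
  if t ≤ 0 then []
  else List.replicate (PySem.Int.floordiv t cs).toNat cs ++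
       (if PySem.Int.mod t cs ≠ 0 then [PySem.Int.mod t cs] else [])

theorem cfShape_small (cs r : Int) (h0 : 0 < r) (h1 : r ≤ cs) : cfShape cs r = [r] := by
  have hcs : 0 < cs := lt_of_lt_of_le h0 h1
  unfold cfShape
  rw [PySem.Int.floordiv_eq_ediv_of_pos hcs, PySem.Int.mod_eq_emod_of_pos hcs]
  rcases eq_or_lt_of_le h1 with h | h
  · subst h
    rw [Int.ediv_self (by omega), Int.emod_self]
    simp [h0.not_ge]
  · rw [Int.ediv_eq_zero_of_lt (by omega) h, Int.emod_eq_of_lt (by omega) h]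
    simp [h0.not_ge, h0.ne']

theorem cfShape_shift (cs t : Int) (hcs : 0 < cs) (h : cs ≤ t) :
    cfShape cs t = cs :: cfShape cs (t - cs) := by
  by_cases h0 : t - cs ≤ 0
  · have ht : t = cs := by omega
    rw [ht, cfShape_small cs cs hcs le_rfl]
    unfold cfShape
    simp
  · have ht : 0 < t := by omega
    unfold cfShape
    rw [PySem.Int.floordiv_eq_ediv_of_pos hcs, PySem.Int.mod_eq_emod_of_pos hcs,
        PySem.Int.floordiv_eq_ediv_of_pos hcs, PySem.Int.mod_eq_emod_of_pos hcs]
    have hdiv : t / cs = (t - cs) / cs + 1 := by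
      conv_lhs => rw [show t = t - cs + 1 * cs by ring]
      rw [Int.add_mul_ediv_right _ _ (show cs ≠ 0 by omega)]
    have hmod : t % cs = (t - cs) % cs := by
      conv_lhs => rw [show t = t - cs + cs * 1 by ring]
      rw [Int.add_mul_emod_self_left]
    have hnn : 0 ≤ (t - cs) / cs := Int.ediv_nonneg (by omega) (by omega)
    rw [hdiv, hmod]
    have : (((t - cs) / cs + 1)).toNat = ((t - cs) / cs).toNat + 1 := by omega
    rw [this, List.replicate_succ]
    simp [ht.not_ge, h0]

theorem loop_none_lim (cs n : Int) (f : Nat) :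
    ∀ req : Int, (n - req).toNat ≤ f →
      iterLoopA cs (some n) f none req = List.replicate (n - req).toNat cs := by
  induction f with
  | zero =>
    intro req h
    have : (n - req).toNat = 0 := by omega
    simp [iterLoopA, this]
  | succ f ih =>
    intro req h
    unfold iterLoopA
    by_cases hge : req ≥ n
    · simp [hge, show (n - req).toNat = 0 by omega]
    · have h1 : (n - (req + 1)).toNat ≤ f := by omega
      rw [show (n - req).toNat = (n - (req + 1)).toNat + 1 by omega, List.replicate_succ]
      simp only [hge, decide_false, Bool.false_eq_true, if_false]
      rw [ih (req + 1) h1]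

theorem loop_some_lim_none_nc (cs : Int) (hcs : 0 < cs) (f : Nat) :
    ∀ r req : Int, r.toNat ≤ f →
      iterLoopA cs none f (some r) req = cfShape cs r := by
  induction f with
  | zero =>
    intro r req h
    have hr : r ≤ 0 := by omega
    simp [iterLoopA, cfShape, hr]
  | succ f ih =>
    intro r req h
    unfold iterLoopA
    by_cases hr : r ≤ 0
    · simp [hr, cfShape]
    · simp only [hr, decide_false, Bool.false_eq_true, if_false]
      by_cases hle : r ≤ cs
      · have hmin : min cs r = r := by omega
        rw [cfShape_small cs r (by omega) hle]
        simp [hmin]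
      · have hmin : min cs r = cs := by omega
        have hpos : ¬ (r - cs ≤ 0) := by omega
        simp only [hmin, hpos, decide_false, Bool.false_eq_true, if_false]
        rw [ih (r - cs) (req + 1) (by omega)]
        rw [cfShape_shift cs r hcs (by omega)]

theorem loop_some_lim (cs n : Int) (hcs : 0 < cs) (f : Nat) :
    ∀ r req : Int, r.toNat ≤ f →
      iterLoopA cs (some n) f (some r) req = cfShape cs (min r ((n - req) * cs)) := by
  induction f with
  | zero =>
    intro r req h
    have hr : r ≤ 0 := by omega
    have : min r ((n - req) * cs) ≤ 0 := le_trans (min_le_left _ _) hr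
    simp [iterLoopA, cfShape, this]
  | succ f ih =>
    intro r req h
    unfold iterLoopA
    by_cases hge : req ≥ n
    · have hmul : (n - req) * cs ≤ 0 := mul_nonpos_of_nonpos_of_nonneg (by omega) (by omega)
      have : min r ((n - req) * cs) ≤ 0 := le_trans (min_le_right _ _) hmul
      simp [hge, cfShape, this]
    · by_cases hr : r ≤ 0
      · have : min r ((n - req) * cs) ≤ 0 := le_trans (min_le_left _ _) hr
        simp [hge, hr, cfShape, this]
      · have hone : 1 ≤ n - req := by omega
        have hcsle : cs ≤ (n - req) * cs := by
          calc cs = 1 * cs := (one_mul cs).symm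
          _ ≤ (n - req) * cs := by
            apply mul_le_mul_of_nonneg_right hone (by omega)
        simp only [hge, hr, decide_false, Bool.false_eq_true, if_false]
        by_cases hle : r ≤ cs
        · have hmin : min cs r = r := by omega
          have hT : min r ((n - req) * cs) = r := min_eq_left (le_trans hle hcsle)
          rw [hT, cfShape_small cs r (by omega) hle]
          simp [hmin]
        · have hmin : min cs r = cs := by omega
          have hpos : ¬ (r - cs ≤ 0) := by omega
          simp only [hmin, hpos, decide_false, Bool.false_eq_true, if_false]
          rw [ih (r - cs) (req + 1) (by omega)]
          have hcsT : cs ≤ min r ((n - req) * cs) := le_min (by omega) hcsle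
          rw [cfShape_shift cs (min r ((n - req) * cs)) hcs hcsT]
          rw [show (n - (req + 1)) * cs = (n - req) * cs - cs by ring, ← min_sub_sub_right]

-- ===== VERDICT (by name: the statement is the Claim_ definition above) =====
theorem iter_request_chunk_sizes_spec : Claim_equal_iter_request_chunk_sizes := by
  intro cs nc lim _ hpre
  obtain ⟨hcs, hnc, hlim, hsome⟩ := hpre
  unfold Spec_iter_request_chunk_sizes iter_request_chunk_sizes iter_request_chunk_sizes_alt
  cases nc with
  | none =>
    cases lim with
    | none => simp at hsome
    | some l =>
      simp only [Option.getD_some] at hlim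
      simp only [hcs.not_ge, if_false, decide_false, hlim.not_ge, decide_false, if_false]
      rw [loop_some_lim_none_nc cs hcs _ l 0 (by omega)]
      unfold cfShape
      simp [hlim.not_ge]
  | some n =>
    simp only [Option.getD_some] at hnc
    cases lim with
    | none =>
      simp only [hcs.not_ge, if_false, hnc.not_ge, decide_false, if_false]
      rw [loop_none_lim cs n _ 0 (by omega)]
      simp
    | some l =>
      simp only [Option.getD_some] at hlim
      simp only [hcs.not_ge, if_false, hnc.not_ge, hlim.not_ge, decide_false, if_false]
      rw [loop_some_lim cs n hcs _ l 0 (by omega)]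
      have hT : 0 < min l (n * cs) := by
        apply lt_min hlim
        have : 1 * cs ≤ n * cs := mul_le_mul_of_nonneg_right (by omega) (by omega)
        omega
      unfold cfShape
      simp only [sub_zero]
      simp [hT.not_ge]
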